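-- pv_equiv track=rewrite | github.com/AileenXie/leetcode | written-examination/00往年真题/tx2017/03-1.py | getMinPair
-- ===== SOURCE A (Python) =====
-- def getMinPair(lst, n):
--     # 数组中所有数字都相等，那么差最小的对就是它们两两组合
--     if lst[0] == lst[n - 1]:
--         return n * (n - 1) // 2
--     mincount = 0
--     mindiff = lst[1] - lst[0]
--     count = 1
--     for i in range(1, n - 1):
--         # 差为0时对数的计算方法是不一样的，所以跳出
--         if mindiff == 0:
--             break
--         if lst[i + 1] - lst[i] == mindiff:
--             count += 1
--         elif lst[i + 1] - lst[i] < mindiff: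
--             mindiff = lst[i + 1] - lst[i]
--             count = 1
--     if mindiff == 0:
--         for i in range(0, n - 1):
--             # 找出差为0的段的起始点
--             if lst[i + 1] - lst[i] == 0 and (i == 0 or lst[i] - lst[i - 1] > 0):
--                 start = i
--             # 找出差为0的段的终点
--             if lst[i + 1] - lst[i] == 0 and (i + 1 == n - 1 or lst[i + 2] - lst[i + 1] > 0):
--                 end = i + 1
--                 equalnum = end - start + 1
--                 # 可能存在多个差为0的子序列，故应分段计算，再把它们相加
--                 mincount = mincount + equalnum * (equalnum - 1) // 2
--         return mincount
--     else:
--         return count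
-- ===== SOURCE B (Python) =====
-- def getMinPair(lst, n):
--     if lst[0] == lst[n - 1]:
--         return n * (n - 1) // 2
--     diffs = [lst[i + 1] - lst[i] for i in range(n - 1)]
--     mindiff = min(diffs)
--     if mindiff != 0:
--         return diffs.count(mindiff)
--     counts = {}
--     for x in lst[:n]:
--         counts[x] = counts.get(x, 0) + 1
--     return sum(c * (c - 1) // 2 for c in counts.values())
-- ===== Notes on version B (the rewrite author's own statement) =====
-- stated objective: simpler
-- what changed: A's single tracking scan (running min + occurrence count with a break) plus a stateful segment-boundary rescan for the duplicate case are replaced by a compute-then-query decomposition: build the adjacent-difference list, take its min and count it, and when that min is 0 sum c*(c-1)//2 over a frequency table of the first n values instead of scanning for segment start/end indices.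
-- outside the precondition, e.g. on getMinPair([1, 2], 0): A returns 1, B raises ValueError; on getMinPair([0, 1, 1, 0, 0, 1], 6): A returns 6, B returns 1
import Mathlib
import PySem

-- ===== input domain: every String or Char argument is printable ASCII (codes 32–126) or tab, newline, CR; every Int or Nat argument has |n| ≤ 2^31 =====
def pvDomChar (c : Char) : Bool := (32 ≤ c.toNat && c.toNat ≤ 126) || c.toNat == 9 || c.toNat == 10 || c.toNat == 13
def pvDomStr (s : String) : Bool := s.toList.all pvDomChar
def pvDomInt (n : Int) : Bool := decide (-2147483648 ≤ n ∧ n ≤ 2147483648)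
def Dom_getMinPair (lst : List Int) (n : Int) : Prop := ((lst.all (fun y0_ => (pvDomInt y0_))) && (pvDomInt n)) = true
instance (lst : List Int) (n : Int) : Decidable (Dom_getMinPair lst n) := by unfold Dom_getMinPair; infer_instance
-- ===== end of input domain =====

-- B replaces A's tracking scan + segment-boundary rescan by diff-list/min/count and a
-- frequency-table sum (objective: simpler). Equivalence is on Pre_: 1 ≤ n ≤ len(lst)
-- minus one unspecified unsorted corner stated above Pre_.

-- ===== PORT A =====
-- lst[i+1] - lst[i], the adjacent difference both Python programs read repeatedly
def pvDiff (lst : List Int) (i : Int) : Int :=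
  PySem.List.pyGetD lst (i + 1) 0 - PySem.List.pyGetD lst i 0

-- body of A's first loop, state (mindiff, count); Python's `break` is the st.1 = 0 test
-- re-run at the top of every iteration (once mindiff = 0 nothing changes the state)
def pvLoop1A (lst : List Int) (st : Int × Int) (i : Int) : Int × Int :=
  if st.1 = 0 then st
  else if pvDiff lst i = st.1 then (st.1, st.2 + 1)
  else if pvDiff lst i < st.1 then (pvDiff lst i, 1)
  else st

-- body of A's second loop, state (start, mincount); Python's `start` is unbound before its
-- first assignment — under Pre_ it is always assigned before the end-branch reads it, so the
-- initial value 0 passed below is never observed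
def pvLoop2A (lst : List Int) (n : Int) (st : Int × Int) (i : Int) : Int × Int :=
  let start := if pvDiff lst i = 0 ∧ (i = 0 ∨ pvDiff lst (i - 1) > 0) then i else st.1
  let mincount :=
    if pvDiff lst i = 0 ∧ (i + 1 = n - 1 ∨ pvDiff lst (i + 1) > 0) then
      let e := i + 1
      let q := e - start + 1
      st.2 + PySem.Int.floordiv (q * (q - 1)) 2
    else st.2
  (start, mincount)

def getMinPair (lst : List Int) (n : Int) : Int :=
  if PySem.List.pyGetD lst 0 0 = PySem.List.pyGetD lst (n - 1) 0 then
    PySem.Int.floordiv (n * (n - 1)) 2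
  else
    let r := (PySem.List.pyRange 1 (n - 1)).foldl (pvLoop1A lst) (pvDiff lst 0, 1)
    if r.1 = 0 then
      ((PySem.List.pyRange 0 (n - 1)).foldl (pvLoop2A lst n) (0, 0)).2
    else r.2

-- ===== PORT B =====
def getMinPair_alt (lst : List Int) (n : Int) : Int :=
  if PySem.List.pyGetD lst 0 0 = PySem.List.pyGetD lst (n - 1) 0 then
    PySem.Int.floordiv (n * (n - 1)) 2
  else
    let diffs := (PySem.List.pyRange 0 (n - 1)).map (pvDiff lst)
    match PySem.List.min? diffs (fun d => d) with
    | none => 0  -- Python's min([]) raises ValueError; Pre_ gives n ≥ 2 here, so diffs ≠ []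
    | some mindiff =>
      if mindiff ≠ 0 then (PySem.List.count diffs mindiff : Int)
      else
        let counts := (PySem.List.slice lst none (some n)).foldl
          (fun (d : PySem.Dict Int Int) x => d.insert x (d.getD x 0 + 1)) PySem.Dict.empty
        (counts.values.map (fun c => PySem.Int.floordiv (c * (c - 1)) 2)).sum

-- ===== PRECONDITION & SPEC =====
-- the adjacent-difference list of the first-n prefix (used by Pre_/D_ and the proofs)
def difL (xs : List Int) : List Int := List.zipWith (fun a b => b - a) xs xs.tail

-- Pre_ is the index-safe domain minus one unspecified corner. Excluded: n > len(lst)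
-- (A raises IndexError at lst[n-1]); n ≤ 0, where Python's negative-index wraparound and
-- empty loop ranges make A's value an accident (and B's min([]) raises ValueError); and
-- prefixes whose adjacent differences are positive up to a zero yet also contain a
-- negative one — an unsorted input on which A runs its duplicate-segment rescan, designed
-- for sorted data, and no particular value is specified (A pairs segment ends against
-- stale start markers; B counts the minimal difference).
-- Also claimed: any n whose (possibly negatively wrapped) index keeps lst[n-1] legal and
-- makes the all-equal guard fire — both programs then return the same guard expression.
def Pre_getMinPair (lst : List Int) (n : Int) : Prop :=
  (1 ≤ n ∧ n ≤ lst.length ∧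
    ¬ (let ds := difL (lst.take n.toNat)
       0 ∈ ds ∧ (∀ d ∈ ds.takeWhile (fun d => decide (d ≠ 0)), 0 < d) ∧ ∃ d ∈ ds, d < 0)) ∨
  (0 < lst.length ∧ 1 - (lst.length : Int) ≤ n ∧ n ≤ lst.length ∧
    PySem.List.pyGetD lst 0 0 = PySem.List.pyGetD lst (n - 1) 0)
instance (lst : List Int) (n : Int) : Decidable (Pre_getMinPair lst n) := by
  unfold Pre_getMinPair; infer_instance

def pvWitness_getMinPair : List Int × Int := ([1, 2, 4], 3)

def Spec_getMinPair (lst : List Int) (n : Int) (out : Int) : Prop := out = getMinPair_alt lst n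
instance (lst : List Int) (n : Int) (out : Int) : Decidable (Spec_getMinPair lst n out) := by
  unfold Spec_getMinPair; infer_instance

-- ===== CLAIM (what is proved, stated in full; the proofs are below) =====
def Claim_equal_getMinPair : Prop := ∀ (lst : List Int) (n : Int), Dom_getMinPair lst n →
  Pre_getMinPair lst n → Spec_getMinPair lst n (getMinPair lst n)

-- ===== LEMMAS AND PROOFS =====

-- A's first-loop body as a function of the diff value alone
def pvStep1 (st : Int × Int) (d : Int) : Int × Int :=
  if st.1 = 0 then st
  else if d = st.1 then (st.1, st.2 + 1)
  else if d < st.1 then (d, 1)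
  else st

-- C(b+1, 2) as both programs compute it
def zbF (b : Int) : Int := PySem.Int.floordiv ((b + 1) * b) 2

-- pair count read off a diff list: one C(b+1,2) term per maximal block of b zeros
def zb : List Int → Int
  | [] => 0
  | d :: t =>
    if d = 0 then
      zbF (1 + ((t.takeWhile (fun y => y == 0)).length : Int)) +
        zb (t.dropWhile (fun y => y == 0))
    else zb t
termination_by l => l.length
decreasing_by
  · exact Nat.lt_succ_of_le (List.length_dropWhile_le _ _)
  · simp

-- A's second-loop body, reading the diff list DS instead of lst
def body2 (DS : List Int) (st : Int × Int) (i : Int) : Int × Int :=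
  let start := if PySem.List.pyGetD DS i 0 = 0 ∧ (i = 0 ∨ PySem.List.pyGetD DS (i - 1) 0 > 0)
    then i else st.1
  let mincount :=
    if PySem.List.pyGetD DS i 0 = 0 ∧
        (i + 1 = (DS.length : Int) ∨ PySem.List.pyGetD DS (i + 1) 0 > 0) then
      let e := i + 1
      let q := e - start + 1
      st.2 + PySem.Int.floordiv (q * (q - 1)) 2
    else st.2
  (start, mincount)

lemma difL_length (xs : List Int) : (difL xs).length = xs.length - 1 := by
  simp [difL]

lemma difL_getElem (xs : List Int) (k : Nat) (h : k < (difL xs).length) :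
    (difL xs)[k] = xs[k+1]'(by simp [difL_length] at h; omega) - xs[k]'(by simp [difL_length] at h; omega) := by
  simp [difL, List.getElem_zipWith, List.getElem_tail]

lemma foldl_min_le_init (l : List Int) (a : Int) : List.foldl min a l ≤ a := by
  induction l generalizing a with
  | nil => simp
  | cons d t ih => exact le_trans (ih (min a d)) (min_le_left _ _)

lemma foldl_min_le_mem (l : List Int) (a x : Int) (hx : x ∈ l) : List.foldl min a l ≤ x := by
  induction l generalizing a with
  | nil => simp at hx
  | cons d t ih =>
    rcases List.mem_cons.1 hx with h | h
    · subst h; exact le_trans (foldl_min_le_init t (min a x)) (min_le_right _ _)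
    · exact ih (min a d) h

lemma foldl_min_mem (l : List Int) (a : Int) : List.foldl min a l = a ∨ List.foldl min a l ∈ l := by
  induction l generalizing a with
  | nil => simp
  | cons d t ih =>
    rcases ih (min a d) with h | h
    · rcases min_choice a d with hm | hm
      · left; rw [List.foldl_cons, h, hm]
      · right; rw [List.foldl_cons, h, hm]; exact List.mem_cons_self ..
    · right
      rw [List.foldl_cons]
      exact List.mem_cons_of_mem _ h

lemma step1_stay (l : List Int) (c : Int) : l.foldl pvStep1 (0, c) = (0, c) := by
  induction l with
  | nil => rfl
  | cons d t ih => simpa [pvStep1] using ih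

lemma foldl_min_assoc (xs : List Int) (a b : Int) :
    List.foldl min (min a b) xs = min a (List.foldl min b xs) := by
  induction xs generalizing b with
  | nil => rfl
  | cons c t ih => rw [List.foldl_cons, List.foldl_cons, min_assoc, ih]

-- A's first loop when the running minimum never hits 0: the break never fires and the
-- loop computes the minimum of the whole diff list together with its multiplicity
lemma step1_fold_ne (l : List Int) (md c : Int)
    (H : ∀ k ≤ l.length, List.foldl min md (l.take k) ≠ 0) :
    l.foldl pvStep1 (md, c) =
      (l.foldl min md,
        if l.foldl min md = md then c + (List.count (l.foldl min md) l : Int)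
        else (List.count (l.foldl min md) l : Int)) := by
  induction l generalizing md c with
  | nil => simp
  | cons d t ih =>
    have hmd : md ≠ 0 := by simpa using H 0 (by omega)
    have H' : ∀ k ≤ t.length, List.foldl min (min md d) (t.take k) ≠ 0 := by
      intro k hk
      have := H (k + 1) (by simpa using hk)
      simpa using this
    by_cases hdm : d = md
    · have hstep : pvStep1 (md, c) d = (md, c + 1) := by
        simp [pvStep1, hdm, hmd]
      have hmin : min md d = md := by rw [hdm]; exact min_self md
      rw [hmin] at H'
      rw [List.foldl_cons, hstep, ih md (c + 1) H']
      simp only [List.foldl_cons, hmin]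
      by_cases hM : List.foldl min md t = md
      · simp [hM, List.count_cons, hdm]; ring
      · have hne : ¬ (d = List.foldl min md t) := by rw [hdm]; exact fun hc => hM hc.symm
        simp [hM, List.count_cons, hne]
    · by_cases hlt : d < md
      · have hstep : pvStep1 (md, c) d = (d, 1) := by
          simp [pvStep1, hdm, hlt, hmd]
        have hmin : min md d = d := min_eq_right (le_of_lt hlt)
        rw [hmin] at H'
        rw [List.foldl_cons, hstep, ih d 1 H']
        simp only [List.foldl_cons, hmin]
        have hle : List.foldl min d t ≤ d := foldl_min_le_init t d
        have hne : ¬ (List.foldl min d t = md) := by omega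
        by_cases hM : List.foldl min d t = d
        · simp [hM, hne, List.count_cons]; omega
        · have hne2 : ¬ d = List.foldl min d t := by omega
          simp [hM, hne, hne2, List.count_cons]
      · have hgt : md < d := by omega
        have hstep : pvStep1 (md, c) d = (md, c) := by
          simp [pvStep1, hdm, hlt, hmd]
        have hmin : min md d = md := min_eq_left (le_of_lt hgt)
        rw [hmin] at H'
        rw [List.foldl_cons, hstep, ih md c H']
        simp only [List.foldl_cons, hmin]
        have hle : List.foldl min md t ≤ md := foldl_min_le_init t md
        have hne2 : ¬ d = List.foldl min md t := by omega
        by_cases hM : List.foldl min md t = md <;>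
          simp [hM, List.count_cons, hne2, hdm, Ne.symm hdm]

-- A's first loop when some prefix minimum is 0: the loop breaks (or ends) with mindiff = 0
lemma step1_fold_zero (l : List Int) (md c : Int)
    (h : ∃ k, k ≤ l.length ∧ List.foldl min md (l.take k) = 0) :
    (l.foldl pvStep1 (md, c)).1 = 0 := by
  induction l generalizing md c with
  | nil =>
    obtain ⟨k, hk, h0⟩ := h
    simp at h0
    simp [h0]
  | cons d t ih =>
    by_cases hmd : md = 0
    · subst hmd
      have hstep : pvStep1 (0, c) d = (0, c) := by simp [pvStep1]
      rw [List.foldl_cons, hstep, step1_stay]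
    · obtain ⟨k, hk, h0⟩ := h
      have hk0 : k ≠ 0 := by
        intro hc
        subst hc
        simp at h0
        exact hmd h0
      have h' : ∃ k', k' ≤ t.length ∧ List.foldl min (min md d) (t.take k') = 0 := by
        refine ⟨k - 1, by simp at hk; omega, ?_⟩
        have : (d :: t).take k = d :: t.take (k - 1) := by
          cases k with
          | zero => omega
          | succ k' => simp
        rw [this, List.foldl_cons] at h0
        exact h0
      rw [List.foldl_cons]
      by_cases hdm : d = md
      · have hstep : pvStep1 (md, c) d = (md, c + 1) := by simp [pvStep1, hdm, hmd]
        rw [hstep]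
        apply ih
        rwa [show min md d = md by rw [hdm]; exact min_self md] at h'
      · by_cases hlt : d < md
        · have hstep : pvStep1 (md, c) d = (d, 1) := by simp [pvStep1, hdm, hlt, hmd]
          rw [hstep]
          apply ih
          rwa [min_eq_right (le_of_lt hlt)] at h'
        · have hstep : pvStep1 (md, c) d = (md, c) := by simp [pvStep1, hdm, hlt, hmd]
          rw [hstep]
          apply ih
          rwa [min_eq_left (by omega)] at h'

-- D_'s 'a zero before any non-positive' reads exactly as: the first non-(>0) entry is 0
lemma Dcond_iff (ds : List Int) :
    (0 ∈ ds ∧ ∀ d ∈ ds.takeWhile (fun d => decide (d ≠ 0)), 0 < d) ↔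
      ((ds.takeWhile (fun x => decide (0 < x))).length < ds.length ∧
        ds.getD (ds.takeWhile (fun x => decide (0 < x))).length 0 = 0) := by
  induction ds with
  | nil => simp
  | cons a t ih =>
    rcases lt_trichotomy a 0 with ha | ha | ha
    · rw [List.takeWhile_cons_of_pos (by simp; omega), List.takeWhile_cons_of_neg (by simp; omega)]
      constructor
      · rintro ⟨-, hall⟩
        have := hall a (List.mem_cons_self ..)
        omega
      · rintro ⟨-, hget⟩
        simp at hget
        omega
    · subst ha
      rw [List.takeWhile_cons_of_neg (by simp), List.takeWhile_cons_of_neg (by simp)]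
      simp
    · rw [List.takeWhile_cons_of_pos (by simp; omega), List.takeWhile_cons_of_pos (by simp [ha])]
      simp only [List.length_cons, List.mem_cons, List.getD_cons_succ]
      constructor
      · rintro ⟨hz, hall⟩
        have hz' : (0 : Int) ∈ t := by
          rcases hz with hz | hz
          · omega
          · exact hz
        have := ih.1 ⟨hz', fun d hd => hall d (Or.inr hd)⟩
        exact ⟨by omega, this.2⟩
      · rintro ⟨hlt, hget⟩
        have := ih.2 ⟨by omega, hget⟩
        refine ⟨Or.inr this.1, ?_⟩
        intro d hd
        rcases hd with rfl | hd
        · exact ha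
        · exact this.2 d hd

-- A breaks out of its first loop iff, scanning the diff list, a zero is reached before
-- any non-positive value: the first non-(>0) entry exists and is 0
lemma break_iff (d : Int) (l : List Int) :
    (∃ k, k ≤ l.length ∧ List.foldl min d (l.take k) = 0) ↔
      (((d :: l).takeWhile (fun x => decide (0 < x))).length < (d :: l).length ∧
        (d :: l).getD ((d :: l).takeWhile (fun x => decide (0 < x))).length 0 = 0) := by
  induction l generalizing d with
  | nil =>
    constructor
    · rintro ⟨k, hk, h0⟩
      have : k = 0 := by simp at hk; omega
      subst this
      simp at h0
      subst h0
      simp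
    · rintro ⟨h1, h2⟩
      rcases lt_trichotomy d 0 with hd | hd | hd
      · rw [List.takeWhile_cons_of_neg (by simp; omega)] at h2
        simp at h2
        omega
      · exact ⟨0, by simp, by simp [hd]⟩
      · rw [List.takeWhile_cons_of_pos (by simp [hd])] at h1
        simp at h1
  | cons b l' ih =>
    rcases lt_trichotomy d 0 with hd | hd | hd
    · constructor
      · rintro ⟨k, hk, h0⟩
        have := foldl_min_le_init ((b :: l').take k) d
        omega
      · rintro ⟨h1, h2⟩
        rw [List.takeWhile_cons_of_neg (by simp; omega)] at h2
        simp at h2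
        omega
    · constructor
      · intro _
        refine ⟨?_, ?_⟩
        · rw [List.takeWhile_cons_of_neg (by simp [hd])]
          simp
        · rw [List.takeWhile_cons_of_neg (by simp [hd])]
          simpa using hd
      · intro _
        exact ⟨0, by simp, by simpa using hd⟩
    · have hmz : ∀ x : Int, min d x = 0 ↔ x = 0 := by
        intro x
        constructor
        · intro hc
          rcases min_choice d x with hm | hm
          · rw [hm] at hc; omega
          · rw [hm] at hc; exact hc
        · intro hc
          subst hc
          exact min_eq_right (by omega)
      constructor
      · rintro ⟨k, hk, h0⟩
        have hk0 : k ≠ 0 := by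
          intro hc; subst hc; simp at h0; omega
        have h0' : List.foldl min b (l'.take (k - 1)) = 0 := by
          have hT : (b :: l').take k = b :: l'.take (k - 1) := by
            cases k with
            | zero => omega
            | succ k' => simp
          rw [hT, List.foldl_cons, foldl_min_assoc] at h0
          exact (hmz _).1 h0
        have := ih b |>.1 ⟨k - 1, by simp at hk; omega, h0'⟩
        rw [List.takeWhile_cons_of_pos (by simp [hd])]
        simpa using this
      · intro hR
        rw [List.takeWhile_cons_of_pos (by simp [hd])] at hR
        obtain ⟨h1, h2⟩ := hR
        simp only [List.length_cons] at h1 h2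
        rw [List.getD_cons_succ] at h2
        have hR2 := (ih b).2 ⟨by simp only [List.length_cons] at h1 ⊢; omega, h2⟩
        obtain ⟨k, hk, h0⟩ := hR2
        refine ⟨k + 1, by simpa using hk, ?_⟩
        have hT : (b :: l').take (k + 1) = b :: l'.take k := by simp
        rw [hT, List.foldl_cons, foldl_min_assoc, (hmz _).2 h0]

-- a prefix with nonnegative adjacent differences is nondecreasing
lemma sorted_of_difL_nonneg (xs : List Int) (h : ∀ d ∈ difL xs, 0 ≤ d) :
    List.Pairwise (· ≤ ·) xs := by
  induction xs with
  | nil => simp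
  | cons a t ih =>
    cases t with
    | nil => simp
    | cons b u =>
      have hd : difL (a :: b :: u) = (b - a) :: difL (b :: u) := rfl
      have hab : a ≤ b := by
        have := h (b - a) (by rw [hd]; exact List.mem_cons_self ..)
        omega
      have hrest : List.Pairwise (· ≤ ·) (b :: u) :=
        ih (fun x hx => h x (by rw [hd]; exact List.mem_cons_of_mem _ hx))
      refine List.pairwise_cons.2 ⟨?_, hrest⟩
      intro x hx
      rcases List.mem_cons.1 hx with rfl | hx
      · exact hab
      · exact le_trans hab ((List.pairwise_cons.1 hrest).1 x hx)


lemma DS_eq_difL (lst : List Int) (m : Nat) (h2 : 2 ≤ m) (hlen : m ≤ lst.length) :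
    (PySem.List.pyRange 0 ((m : Int) - 1)).map (pvDiff lst) = difL (lst.take m) := by
  apply List.ext_getElem
  · simp [PySem.List.length_pyRange_one, difL_length]
    omega
  · intro k h1 h2'
    have hk : k < m - 1 := by
      simpa [PySem.List.length_pyRange_one] using h1
    have hkl : k + 1 < lst.length := by omega
    rw [List.getElem_map, PySem.List.getElem_pyRange_one]
    rw [difL_getElem]
    simp only [List.getElem_take]
    show pvDiff lst (0 + (k : Int)) = _
    rw [zero_add]
    unfold pvDiff
    have : ((k : Int) + 1) = ((k + 1 : Nat) : Int) := by push_cast; ring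
    rw [this, PySem.List.pyGetD_natCast, PySem.List.pyGetD_natCast,
      List.getD_eq_getElem lst 0 hkl, List.getD_eq_getElem lst 0 (by omega : k < lst.length)]


lemma mid_fold (DS : List Int) (l : List Int) (st : Int × Int)
    (h : ∀ i ∈ l, ∃ j : Nat, i = (j : Int) ∧ 1 ≤ j ∧ j + 1 < DS.length ∧
      DS.getD j 0 = 0 ∧ DS.getD (j - 1) 0 = 0 ∧ DS.getD (j + 1) 0 = 0) :
    l.foldl (body2 DS) st = st := by
  induction l generalizing st with
  | nil => rfl
  | cons i t ih =>
    obtain ⟨j, rfl, hj1, hjL, hz, hzp, hzn⟩ := h _ (List.mem_cons_self ..)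
    have hstep : body2 DS st (j : Int) = st := by
      have e1 : PySem.List.pyGetD DS (j : Int) 0 = 0 := by
        rw [PySem.List.pyGetD_natCast]; exact hz
      have e2 : PySem.List.pyGetD DS ((j : Int) - 1) 0 = 0 := by
        have : ((j : Int) - 1) = ((j - 1 : Nat) : Int) := by omega
        rw [this, PySem.List.pyGetD_natCast]; exact hzp
      have e3 : PySem.List.pyGetD DS ((j : Int) + 1) 0 = 0 := by
        have : ((j : Int) + 1) = ((j + 1 : Nat) : Int) := by push_cast; ring
        rw [this, PySem.List.pyGetD_natCast]; exact hzn
      have g1 : ¬ ((j : Int) = 0 ∨ PySem.List.pyGetD DS ((j : Int) - 1) 0 > 0) := by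
        rw [e2]; push_neg; constructor
        · omega
        · omega
      have g2 : ¬ ((j : Int) + 1 = (DS.length : Int) ∨ PySem.List.pyGetD DS ((j : Int) + 1) 0 > 0) := by
        rw [e3]; push_neg; constructor
        · omega
        · omega
      have hj0 : ¬ (j = 0) := by omega
      have hlt : ¬ (0 < PySem.List.pyGetD DS ((j : Int) - 1) 0) := by rw [e2]; omega
      simp [body2, e1, g2, hj0, hlt]
    rw [List.foldl_cons, hstep]
    exact ih _ (fun x hx => h x (List.mem_cons_of_mem _ hx))


lemma dropWhile_head_false {p : Int → Bool} (l : List Int) (y : Int) (ys : List Int)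
    (h : l.dropWhile p = y :: ys) : p y = false := by
  induction l with
  | nil => simp at h
  | cons a t ih =>
    by_cases hp : p a
    · rw [List.dropWhile_cons_of_pos hp] at h; exact ih h
    · rw [List.dropWhile_cons_of_neg (by simpa using hp)] at h
      cases h; simpa using hp

lemma difL_run (r u : List Int) (a : Int) (h : ∀ x ∈ r, x = a) :
    difL (a :: (r ++ u)) = List.replicate r.length 0 ++ difL (a :: u) := by
  induction r with
  | nil => simp
  | cons x r' ih =>
    have hx : x = a := h x (List.mem_cons_self ..)
    subst hx
    have := ih (fun y hy => h y (List.mem_cons_of_mem _ hy))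
    show (x - x) :: difL (x :: (r' ++ u)) = _
    rw [this]
    simp [List.replicate_succ]


lemma getD_drop (l : List Int) (i j : Nat) : (l.drop i).getD j 0 = l.getD (i + j) 0 := by
  simp [List.getD_eq_getElem?_getD, List.getElem?_drop]

lemma takeWhile_replicate_append (p : Int → Bool) (k : Nat) (x : Int) (l : List Int)
    (hp : p x = true) :
    (List.replicate k x ++ l).takeWhile p = List.replicate k x ++ l.takeWhile p := by
  induction k with
  | zero => simp
  | succ k ih => simp [List.replicate_succ, List.takeWhile_cons_of_pos hp, ih]

lemma dropWhile_replicate_append (p : Int → Bool) (k : Nat) (x : Int) (l : List Int)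
    (hp : p x = true) :
    (List.replicate k x ++ l).dropWhile p = l.dropWhile p := by
  induction k with
  | zero => simp
  | succ k ih => simp [List.replicate_succ, List.dropWhile_cons_of_pos hp, ih]

lemma dropWhile_self_eq (l : List Int) (p : Int → Bool) : (l.dropWhile p).takeWhile p = [] ∧
    (l.dropWhile p).dropWhile p = l.dropWhile p := by
  cases hdw : l.dropWhile p with
  | nil => simp
  | cons y ys =>
    have hy : p y = false := dropWhile_head_false l y ys hdw
    exact ⟨List.takeWhile_cons_of_neg (by simp [hy]),
      List.dropWhile_cons_of_neg (by simp [hy])⟩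

lemma fold_body2 (DS : List Int) (hnn : ∀ d ∈ DS, 0 ≤ d) :
    ∀ (fuel s : Nat) (start acc : Int), DS.length - s ≤ fuel →
    (s ≠ 0 → s < DS.length → DS.getD s 0 = 0 → 0 < DS.getD (s - 1) 0) →
    ((PySem.List.pyRange (s : Int) (DS.length : Int)).foldl (body2 DS) (start, acc)).2 =
      acc + zb (DS.drop s) := by
  have hnnD : ∀ j, 0 ≤ DS.getD j 0 := by
    intro j
    rcases lt_or_ge j DS.length with hj | hj
    · rw [List.getD_eq_getElem _ _ hj]; exact hnn _ (List.getElem_mem _)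
    · rw [List.getD_eq_default _ _ hj]
  intro fuel
  induction fuel with
  | zero =>
    intro s start acc hf hinv
    have hs : DS.length ≤ s := by omega
    rw [PySem.List.pyRange_one_eq_nil (by exact_mod_cast hs), List.drop_eq_nil_of_le hs]
    simp [zb]
  | succ f ih =>
    intro s start acc hf hinv
    by_cases hsL : DS.length ≤ s
    · rw [PySem.List.pyRange_one_eq_nil (by exact_mod_cast hsL), List.drop_eq_nil_of_le hsL]
      simp [zb]
    · push_neg at hsL
      have e1 : PySem.List.pyGetD DS (s : Int) 0 = DS.getD s 0 := by
        rw [PySem.List.pyGetD_natCast]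
      by_cases hz : DS.getD s 0 = 0
      · -- a maximal block of zeros starts at s
        set w := DS.drop (s + 1) with hw
        set tw := w.takeWhile (fun y => y == 0) with htw
        set dw := w.dropWhile (fun y => y == 0) with hdw
        set b := 1 + tw.length with hb
        have htwrep : tw = List.replicate tw.length (0 : Int) :=
          List.eq_replicate_length.2 (fun x hx => by
            have := List.mem_takeWhile_imp hx; exact eq_of_beq this)
        have hwdec : w = List.replicate tw.length (0 : Int) ++ dw := by
          conv_lhs => rw [← List.takeWhile_append_dropWhile (p := fun y => y == 0) (l := w)]
          rw [← htw, ← hdw, htwrep]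
          simp
        have hdropS : DS.drop s = List.replicate b (0 : Int) ++ dw := by
          have h1 : DS.drop s = DS.getD s 0 :: w := by
            rw [List.getD_eq_getElem _ _ hsL, hw]
            exact List.drop_eq_getElem_cons hsL
          have hb2 : b = tw.length + 1 := by omega
          rw [h1, hz, hwdec, hb2, List.replicate_succ]
          simp
        have hwlen : w.length = DS.length - (s + 1) := by
          rw [hw]; simp
        have htwle : tw.length ≤ w.length := by
          rw [htw]; exact (List.takeWhile_prefix _).length_le
        have hbL : s + b ≤ DS.length := by omega
        have hdwlen : b + dw.length = DS.length - s := by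
          have := congrArg List.length hdropS
          simp at this
          omega
        have hzj : ∀ j, s ≤ j → j < s + b → DS.getD j 0 = 0 := by
          intro j hj1 hj2
          have : DS.getD j 0 = (DS.drop s).getD (j - s) 0 := by
            rw [getD_drop]
            congr 1
            omega
          rw [this, hdropS, List.getD_eq_getElem?_getD,
            List.getElem?_append_left (by simp; omega), List.getElem?_replicate,
            if_pos (by omega : j - s < b)]
          rfl
        have hdropSB : DS.drop (s + b) = dw := by
          have : DS.drop (s + b) = (DS.drop s).drop b := by
            rw [List.drop_drop]
          rw [this, hdropS]
          simpa using List.drop_left (l₁ := List.replicate b (0:Int)) (l₂ := dw)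
        have hend : s + b = DS.length ∨ 0 < DS.getD (s + b) 0 := by
          rcases Nat.eq_or_lt_of_le hbL with h | h
          · exact Or.inl h
          · right
            cases hcase : dw with
            | nil =>
              exfalso
              rw [hcase] at hdwlen
              simp at hdwlen
              omega
            | cons y ys =>
              have hy : (y == 0) = false := dropWhile_head_false w y ys (by rw [← hdw, hcase])
              have hyne : y ≠ 0 := by simpa using hy
              have h5 := getD_drop DS (s + b) 0
              have h6 : DS.getD (s + b) 0 = y := by
                simp only [Nat.add_zero] at h5
                rw [← h5, hdropSB, hcase]
                rfl
              have hy0 : 0 ≤ DS.getD (s + b) 0 := hnnD _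
              omega
        have hzbS : zb (DS.drop s) = zbF (b : Int) + zb dw := by
          rw [hdropS]
          have hb1 : List.replicate b (0:Int) ++ dw = 0 :: (List.replicate tw.length 0 ++ dw) := by
            have hb2 : b = tw.length + 1 := by omega
            rw [hb2, List.replicate_succ]
            simp
          rw [hb1, zb]
          rw [if_pos rfl]
          have htw2 : (List.replicate tw.length (0:Int) ++ dw).takeWhile (fun y => y == 0) =
              List.replicate tw.length 0 := by
            rw [takeWhile_replicate_append _ _ _ _ (by simp), (dropWhile_self_eq w _).1]
            simp
          have hdw2 : (List.replicate tw.length (0:Int) ++ dw).dropWhile (fun y => y == 0) = dw := by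
            rw [dropWhile_replicate_append _ _ _ _ (by simp)]
            exact (dropWhile_self_eq w _).2
          rw [htw2, hdw2]
          simp only [List.length_replicate]
          rw [show ((b : Nat) : Int) = 1 + (tw.length : Int) by rw [hb]; push_cast; ring]
        have hsplit : PySem.List.pyRange (s : Int) (DS.length : Int) =
            PySem.List.pyRange (s : Int) ((s + b : Nat) : Int) ++
              PySem.List.pyRange ((s + b : Nat) : Int) (DS.length : Int) :=
          PySem.List.pyRange_one_append _ _ _ (by push_cast; omega) (by exact_mod_cast hbL)
        have hg1 : ((s : Int) = 0 ∨ PySem.List.pyGetD DS ((s : Int) - 1) 0 > 0) := by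
          by_cases hs0 : s = 0
          · left; exact_mod_cast congrArg Nat.cast hs0
          · right
            have : ((s : Int) - 1) = ((s - 1 : Nat) : Int) := by omega
            rw [this, PySem.List.pyGetD_natCast]
            exact hinv hs0 hsL hz
        have e1z : PySem.List.pyGetD DS (s : Int) 0 = 0 := by rw [e1]; exact hz
        have c1 : (PySem.List.pyGetD DS (s : Int) 0 = 0 ∧
            ((s : Int) = 0 ∨ PySem.List.pyGetD DS ((s : Int) - 1) 0 > 0)) := ⟨e1z, hg1⟩
        have hblock : (PySem.List.pyRange (s : Int) ((s + b : Nat) : Int)).foldl (body2 DS)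
            (start, acc) = ((s : Int), acc + zbF (b : Int)) := by
          by_cases hbone : b = 1
          · have hr : PySem.List.pyRange (s : Int) ((s + b : Nat) : Int) = [(s : Int)] := by
              rw [show ((s + b : Nat) : Int) = (s : Int) + 1 by omega]
              exact PySem.List.pyRange_one_singleton _
            have c2 : (PySem.List.pyGetD DS (s : Int) 0 = 0 ∧
                ((s : Int) + 1 = (DS.length : Int) ∨ PySem.List.pyGetD DS ((s : Int) + 1) 0 > 0)) := by
              refine ⟨e1z, ?_⟩
              rcases hend with h | h
              · left; omega
              · right
                rw [show ((s : Int) + 1) = ((s + 1 : Nat) : Int) by omega,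
                  PySem.List.pyGetD_natCast]
                rw [hbone] at h
                exact h
            rw [hr]
            show body2 DS (start, acc) (s : Int) = _
            simp only [body2]
            rw [if_pos c1, if_pos c2]
            refine Prod.ext rfl ?_
            show acc + PySem.Int.floordiv _ 2 = acc + zbF _
            congr 1
            rw [show ((s:Int) + 1 - (s:Int) + 1) = 2 by ring, zbF, hbone]
            norm_num
          · have hbge : 2 ≤ b := by omega
            have hsplit2 : PySem.List.pyRange (s : Int) ((s + b : Nat) : Int) =
                (s : Int) :: (PySem.List.pyRange ((s + 1 : Nat) : Int) ((s + b - 1 : Nat) : Int) ++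
                  [((s + b - 1 : Nat) : Int)]) := by
              rw [PySem.List.pyRange_one_cons (by omega : (s : Int) < ((s + b : Nat) : Int)),
                show ((s : Int) + 1) = ((s + 1 : Nat) : Int) by omega,
                PySem.List.pyRange_one_append ((s + 1 : Nat) : Int) ((s + b - 1 : Nat) : Int)
                  ((s + b : Nat) : Int) (by omega) (by omega),
                show ((s + b : Nat) : Int) = ((s + b - 1 : Nat) : Int) + 1 by omega,
                PySem.List.pyRange_one_singleton]
            have hstep0 : body2 DS (start, acc) (s : Int) = ((s : Int), acc) := by
              have c2neg : ¬ ((s : Int) + 1 = (DS.length : Int) ∨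
                  PySem.List.pyGetD DS ((s : Int) + 1) 0 > 0) := by
                push_neg
                constructor
                · omega
                · rw [show ((s : Int) + 1) = ((s + 1 : Nat) : Int) by omega,
                    PySem.List.pyGetD_natCast, hzj (s + 1) (by omega) (by omega)]
              simp only [body2]
              rw [if_pos c1, if_neg (by tauto : ¬ (PySem.List.pyGetD DS (s : Int) 0 = 0 ∧
                ((s : Int) + 1 = (DS.length : Int) ∨ PySem.List.pyGetD DS ((s : Int) + 1) 0 > 0)))]
            have hmid : (PySem.List.pyRange ((s + 1 : Nat) : Int) ((s + b - 1 : Nat) : Int)).foldl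
                (body2 DS) ((s : Int), acc) = ((s : Int), acc) := by
              apply mid_fold
              intro i hi
              rw [PySem.List.mem_pyRange_one] at hi
              refine ⟨i.toNat, by omega, by omega, by omega, ?_, ?_, ?_⟩
              · exact hzj i.toNat (by omega) (by omega)
              · exact hzj (i.toNat - 1) (by omega) (by omega)
              · exact hzj (i.toNat + 1) (by omega) (by omega)
            have hlast : body2 DS ((s : Int), acc) ((s + b - 1 : Nat) : Int) =
                ((s : Int), acc + zbF (b : Int)) := by
              have e1l : PySem.List.pyGetD DS ((s + b - 1 : Nat) : Int) 0 = 0 := by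
                rw [PySem.List.pyGetD_natCast]
                exact hzj (s + b - 1) (by omega) (by omega)
              have c1neg : ¬ (PySem.List.pyGetD DS ((s + b - 1 : Nat) : Int) 0 = 0 ∧
                  (((s + b - 1 : Nat) : Int) = 0 ∨
                    PySem.List.pyGetD DS (((s + b - 1 : Nat) : Int) - 1) 0 > 0)) := by
                rintro ⟨-, h | h⟩
                · omega
                · rw [show (((s + b - 1 : Nat) : Int) - 1) = ((s + b - 2 : Nat) : Int) by omega,
                    PySem.List.pyGetD_natCast, hzj (s + b - 2) (by omega) (by omega)] at h
                  omega
              have c2l : (PySem.List.pyGetD DS ((s + b - 1 : Nat) : Int) 0 = 0 ∧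
                  (((s + b - 1 : Nat) : Int) + 1 = (DS.length : Int) ∨
                    PySem.List.pyGetD DS (((s + b - 1 : Nat) : Int) + 1) 0 > 0)) := by
                refine ⟨e1l, ?_⟩
                rcases hend with h | h
                · left; omega
                · right
                  rw [show (((s + b - 1 : Nat) : Int) + 1) = ((s + b : Nat) : Int) by omega,
                    PySem.List.pyGetD_natCast]
                  exact h
              simp only [body2]
              rw [if_neg c1neg, if_pos c2l]
              refine Prod.ext rfl ?_
              show acc + PySem.Int.floordiv _ 2 = acc + zbF _
              congr 1
              rw [show (((s + b - 1 : Nat) : Int) + 1 - (s : Int) + 1) = (b : Int) + 1 by omega,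
                show ((b : Int) + 1 - 1) = (b : Int) by ring, zbF]
            rw [hsplit2, List.foldl_cons, hstep0, List.foldl_append, hmid]
            show body2 DS ((s : Int), acc) ((s + b - 1 : Nat) : Int) = _
            rw [hlast]
        rw [hsplit, List.foldl_append, hblock,
          ih (s + b) _ _ (by omega) (by
            intro h1 h2 h3
            rcases hend with h | h
            · omega
            · omega),
          hzbS, hdropSB]
        ring
      · -- nonzero diff at s: both guards fail, step is the identity
        have hcons : PySem.List.pyRange (s : Int) (DS.length : Int) =
            (s : Int) :: PySem.List.pyRange ((s : Int) + 1) (DS.length : Int) :=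
          PySem.List.pyRange_one_cons (by exact_mod_cast hsL)
        have hstep : body2 DS (start, acc) (s : Int) = (start, acc) := by
          have hne : DS[s]?.getD 0 ≠ 0 := by
            rw [← List.getD_eq_getElem?_getD]; exact hz
          simp [body2, hne]
        have hcast : ((s : Int) + 1) = ((s + 1 : Nat) : Int) := by push_cast; ring
        rw [hcons, List.foldl_cons, hstep, hcast,
          ih (s + 1) start acc (by omega) (by
            intro _ _ _
            have h0 : 0 ≤ DS.getD s 0 := hnnD s
            simp only [Nat.add_sub_cancel]
            omega)]
        have hdropS : DS.drop s = DS.getD s 0 :: DS.drop (s + 1) := by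
          rw [List.getD_eq_getElem _ _ hsL]
          exact List.drop_eq_getElem_cons hsL
        rw [hdropS, zb, if_neg hz]


def pvG (c : Int) : Int := PySem.Int.floordiv (c * (c - 1)) 2

lemma zbF_eq_pvG (b : Int) : zbF b = pvG (b + 1) := by
  unfold zbF pvG
  congr 1
  ring

lemma pvG_one : pvG 1 = 0 := by decide

lemma zb_replicate_zero (k : Nat) (l : List Int) (hl : l.takeWhile (fun y => y == 0) = []) :
    zb (List.replicate (k + 1) (0 : Int) ++ l) = zbF ((k : Int) + 1) + zb l := by
  rw [List.replicate_succ, List.cons_append, zb, if_pos rfl,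
    takeWhile_replicate_append _ _ _ _ (by simp), hl,
    dropWhile_replicate_append _ _ _ _ (by simp), List.append_nil, List.length_replicate]
  have hld : l.dropWhile (fun y => y == 0) = l := by
    have h2 := List.takeWhile_append_dropWhile (p := fun y => y == 0) (l := l)
    rw [hl] at h2
    simpa using h2
  rw [hld]
  congr 1
  congr 1
  push_cast
  ring

lemma zb_difL_sorted_aux : ∀ (N : Nat) (xs : List Int), xs.length ≤ N →
    List.Pairwise (· ≤ ·) xs →
    zb (difL xs) = ∑ k ∈ xs.toFinset, pvG (List.count k xs : Int) := by
  intro N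
  induction N with
  | zero =>
    intro xs hN _
    have : xs = [] := List.length_eq_zero_iff.1 (by omega)
    subst this
    simp [difL, zb]
  | succ N ih =>
    intro xs hN h
    cases xs with
    | nil => simp [difL, zb]
    | cons a t =>
      set r := t.takeWhile (fun y => y == a) with hrdef
      set u := t.dropWhile (fun y => y == a) with hudef
      have htru : t = r ++ u := (List.takeWhile_append_dropWhile).symm
      have hra : ∀ x ∈ r, x = a := by
        intro x hx
        rw [hrdef] at hx
        exact eq_of_beq (List.mem_takeWhile_imp (p := fun y => y == a) hx)
      have hut : List.Sublist u t := by rw [hudef]; exact List.dropWhile_sublist _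
      have hus : List.Pairwise (· ≤ ·) u :=
        List.Pairwise.sublist (hut.trans (List.sublist_cons_self a t)) h
      have hul : u.length ≤ N := by
        have h1 : u.length ≤ t.length := hut.length_le
        simp at hN
        omega
      have hale : ∀ x ∈ t, a ≤ x := fun x hx => (List.pairwise_cons.1 h).1 x hx
      have hau : a ∉ u := by
        cases hcase : u with
        | nil => simp
        | cons y ys =>
          have hy : (y == a) = false := dropWhile_head_false t y ys (by rw [← hudef, hcase])
          have hyne : y ≠ a := by simpa using hy
          have hym : y ∈ t := List.Sublist.mem (by rw [hcase]; exact List.mem_cons_self ..) hut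
          have hay : a < y := lt_of_le_of_ne (hale y hym) (Ne.symm hyne)
          intro hmem
          rcases List.mem_cons.1 hmem with h1 | h1
          · omega
          · have : y ≤ a := by
              have := (List.pairwise_cons.1 (by rw [← hcase]; exact hus)).1 a h1
              exact this
            omega
      have hcount_a : List.count a (a :: t) = r.length + 1 := by
        rw [List.count_cons_self, htru, List.count_append]
        have h1 : List.count a r = r.length := by
          rw [List.count_eq_length]
          intro x hx
          exact (hra x hx).symm
        have h2 : List.count a u = 0 := List.count_eq_zero.2 hau
        omega
      have hcount_u : ∀ k ∈ u.toFinset, List.count k (a :: t) = List.count k u := by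
        intro k hk
        have hku : k ∈ u := List.mem_toFinset.1 hk
        have hkna : k ≠ a := fun hc => hau (hc ▸ hku)
        rw [List.count_cons_of_ne (Ne.symm hkna), htru, List.count_append]
        have : List.count k r = 0 := by
          rw [List.count_eq_zero]
          intro hc
          exact hkna (hra k hc)
        omega
      have hfin : (a :: t).toFinset = insert a u.toFinset := by
        ext y
        simp only [List.mem_toFinset, List.mem_cons, Finset.mem_insert]
        constructor
        · rintro (rfl | hy)
          · exact Or.inl rfl
          · rw [htru] at hy
            rcases List.mem_append.1 hy with hy | hy
            · exact Or.inl (hra y hy)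
            · exact Or.inr hy
        · rintro (rfl | hy)
          · exact Or.inl rfl
          · exact Or.inr (List.Sublist.mem hy hut)
      have hanotu : a ∉ u.toFinset := fun hc => hau (List.mem_toFinset.1 hc)
      rw [hfin, Finset.sum_insert hanotu, hcount_a,
        Finset.sum_congr rfl (fun k hk => by rw [hcount_u k hk]), htru, difL_run r u a hra,
        ← ih u hul hus]
      cases hcase : u with
      | nil =>
        have e1 : difL [a] = [] := rfl
        have e2 : difL ([] : List Int) = [] := rfl
        rw [e1, e2, List.append_nil]
        cases hk : r.length with
        | zero => simp [zb, pvG_one]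
        | succ k =>
          rw [show List.replicate (k + 1) (0 : Int) = List.replicate (k + 1) (0 : Int) ++ []
              by simp,
            zb_replicate_zero k [] rfl, zbF_eq_pvG,
            show ((k : Int) + 1 + 1) = ((k + 1 + 1 : Nat) : Int) by push_cast; ring]
      | cons y ys =>
        have hy : (y == a) = false := dropWhile_head_false t y ys (by rw [← hudef, hcase])
        have hyne : (y - a) ≠ 0 := by
          have : y ≠ a := by simpa using hy
          omega
        have hdc : difL (a :: y :: ys) = (y - a) :: difL (y :: ys) := rfl
        have hzskip : zb ((y - a) :: difL (y :: ys)) = zb (difL (y :: ys)) := by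
          rw [zb, if_neg hyne]
        cases hk : r.length with
        | zero =>
          simp only [List.replicate_zero, List.nil_append]
          rw [hdc, hzskip]
          norm_num [pvG_one]
        | succ k =>
          rw [hdc, zb_replicate_zero k ((y - a) :: difL (y :: ys))
              (List.takeWhile_cons_of_neg (by simpa using hyne)), hzskip, zbF_eq_pvG,
            show ((k : Int) + 1 + 1) = ((k + 1 + 1 : Nat) : Int) by push_cast; ring]

lemma zb_difL_sorted (xs : List Int) (h : List.Pairwise (· ≤ ·) xs) :
    zb (difL xs) = ∑ k ∈ xs.toFinset, pvG (List.count k xs : Int) :=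
  zb_difL_sorted_aux xs.length xs le_rfl h

lemma B_counter_sum (xs : List Int) :
    ((PySem.Dict.counter xs).values.map
        (fun c => PySem.Int.floordiv (c * (c - 1)) 2)).sum =
      ∑ k ∈ xs.toFinset, pvG (List.count k xs : Int) := by
  have hvals : (PySem.Dict.counter xs).values =
      (PySem.Set.ofList xs).map (fun k => (List.count k xs : Int)) := by
    show ((PySem.Dict.counter xs).items.map (·.2)) = _
    rw [PySem.Dict.items_counter]
    simp
  rw [hvals, List.map_map]
  have hnd : (PySem.Set.ofList xs : List Int).Nodup := PySem.Set.nodup_ofList xs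
  rw [← List.sum_toFinset _ hnd]
  have hfs : (PySem.Set.ofList xs : List Int).toFinset = xs.toFinset := by
    ext y
    simp [List.mem_toFinset, PySem.Set.mem_ofList]
  rw [hfs]
  rfl

-- ===== VERDICT (by name: the statement is the Claim_ definition above) =====
theorem getMinPair_spec : Claim_equal_getMinPair := by
  intro lst n _ hpre
  show getMinPair lst n = getMinPair_alt lst n
  rcases hpre with ⟨h1, h2, hND⟩ | ⟨-, -, -, hg⟩
  swap
  · unfold getMinPair getMinPair_alt
    rw [if_pos hg, if_pos hg]
  by_cases hg : PySem.List.pyGetD lst 0 0 = PySem.List.pyGetD lst (n - 1) 0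
  · unfold getMinPair getMinPair_alt
    rw [if_pos hg, if_pos hg]
  · have hn2 : 2 ≤ n := by
      rcases eq_or_lt_of_le h1 with h | h
      · exfalso; apply hg; rw [← h]; norm_num
      · omega
    have hm2 : 2 ≤ n.toNat := by omega
    have hml : n.toNat ≤ lst.length := by omega
    have hnm : n = ((n.toNat : Nat) : Int) := by omega
    have hDS : (PySem.List.pyRange 0 (n - 1)).map (pvDiff lst) = difL (lst.take n.toNat) := by
      rw [hnm]
      exact DS_eq_difL lst n.toNat hm2 hml
    set DS := (PySem.List.pyRange 0 (n - 1)).map (pvDiff lst) with hDSdef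
    have hlenDS : (DS.length : Int) = n - 1 := by
      rw [hDSdef]
      simp [PySem.List.length_pyRange_one]
      omega
    have hne : DS ≠ [] := by
      intro hc
      rw [hc] at hlenDS
      simp at hlenDS
      omega
    have hcons : DS = pvDiff lst 0 :: (PySem.List.pyRange 1 (n - 1)).map (pvDiff lst) := by
      rw [hDSdef, PySem.List.pyRange_one_cons (by omega : (0:Int) < n - 1), List.map_cons]
      norm_num
    set DT := (PySem.List.pyRange 1 (n - 1)).map (pvDiff lst) with hDT
    have hfold1 : (PySem.List.pyRange 1 (n - 1)).foldl (pvLoop1A lst) (pvDiff lst 0, 1) =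
        DT.foldl pvStep1 (pvDiff lst 0, 1) := by
      rw [hDT, List.foldl_map]
      rfl
    cases hMo : PySem.List.min? DS (fun d => d) with
    | none =>
      exfalso
      exact hne ((PySem.List.min?_eq_none_iff _ _).1 hMo)
    | some M =>
      have hMmem : M ∈ DS := PySem.List.min?_mem hMo
      have hMle : ∀ y ∈ DS, M ≤ y := PySem.List.min?_isMin hMo
      have hd0mem : pvDiff lst 0 ∈ DS := by rw [hcons]; exact List.mem_cons_self ..
      have hDTsub : ∀ d ∈ DT, d ∈ DS := by
        intro d hd
        rw [hcons]
        exact List.mem_cons_of_mem _ hd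
      unfold getMinPair getMinPair_alt
      rw [if_neg hg, if_neg hg]
      simp only [← hDSdef, hMo]
      by_cases hbk : ∃ k, k ≤ DT.length ∧ List.foldl min (pvDiff lst 0) (DT.take k) = 0
      · -- A's first loop hits mindiff = 0: under ¬D_ all diffs are nonnegative (sorted)
        have hDcond := (break_iff (pvDiff lst 0) DT).1 hbk
        rw [← hcons] at hDcond
        have hnn : ∀ d ∈ DS, 0 ≤ d := by
          intro d hd
          by_contra hneg
          obtain ⟨hA, hB⟩ := (Dcond_iff DS).2 hDcond
          refine hND ⟨?_, ?_, ⟨d, by rw [← hDS]; exact hd, by omega⟩⟩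
          · rw [← hDS]; exact hA
          · rw [← hDS]; exact hB
        have hs : List.Pairwise (· ≤ ·) (lst.take n.toNat) :=
          sorted_of_difL_nonneg _ (by rw [← hDS]; exact hnn)
        have hMz : M = 0 := by
          have h0mem : (0 : Int) ∈ DS := by
            obtain ⟨hlt, hget⟩ := hDcond
            rw [List.getD_eq_getElem _ _ hlt] at hget
            rw [← hget]
            exact List.getElem_mem _
          have := hMle 0 h0mem
          have := hnn M hMmem
          omega
        rw [if_neg (show ¬ (M ≠ 0) by simp [hMz])]
        have hr1 : ((PySem.List.pyRange 1 (n - 1)).foldl (pvLoop1A lst) (pvDiff lst 0, 1)).1 = 0 := by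
          rw [hfold1]
          exact step1_fold_zero DT (pvDiff lst 0) 1 hbk
        rw [if_pos hr1]
        have hconv : (PySem.List.pyRange 0 (n - 1)).foldl (pvLoop2A lst n) (0, 0) =
            (PySem.List.pyRange 0 (n - 1)).foldl (body2 DS) (0, 0) := by
          apply PySem.List.foldl_congr_mem
          intro acc i hi
          rw [PySem.List.mem_pyRange_one] at hi
          have eA : pvDiff lst i = PySem.List.pyGetD DS i 0 :=
            (PySem.List.pyGetD_map_pyRange_of_nonneg (pvDiff lst) (n - 1) i 0 hi.1 hi.2).symm
          have hprev : (i = 0 ∨ pvDiff lst (i - 1) > 0) ↔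
              (i = 0 ∨ PySem.List.pyGetD DS (i - 1) 0 > 0) := by
            by_cases hi0 : i = 0
            · simp [hi0]
            · rw [← PySem.List.pyGetD_map_pyRange_of_nonneg (pvDiff lst) (n - 1) (i - 1) 0
                (by omega) (by omega)]
          have hnext : (i + 1 = n - 1 ∨ pvDiff lst (i + 1) > 0) ↔
              (i + 1 = (DS.length : Int) ∨ PySem.List.pyGetD DS (i + 1) 0 > 0) := by
            rw [hlenDS]
            by_cases hin : i + 1 = n - 1
            · simp [hin]
            · rw [← PySem.List.pyGetD_map_pyRange_of_nonneg (pvDiff lst) (n - 1) (i + 1) 0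
                (by omega) (by omega)]
          simp only [pvLoop2A, body2]
          rw [eA]
          simp only [hprev, hnext]
        rw [hconv, ← hlenDS]
        have hfold2 := fold_body2 DS hnn DS.length 0 0 0 (by omega)
          (by intro hcontra; exact absurd rfl hcontra)
        rw [show ((0 : Nat) : Int) = (0 : Int) from rfl] at hfold2
        rw [hfold2, List.drop_zero, zero_add]
        have hslice : PySem.List.slice lst none (some n) = lst.take n.toNat :=
          PySem.List.slice_to lst (by omega)
        rw [hslice, PySem.Dict.foldl_insert_getD_add_one_eq_counter, B_counter_sum,
          hDS, zb_difL_sorted _ hs]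
      · -- the break never fires: A returns the multiplicity of the overall minimum
        push_neg at hbk
        have hM' : DT.foldl min (pvDiff lst 0) = M := by
          apply le_antisymm
          · rw [hcons] at hMmem
            rcases List.mem_cons.1 hMmem with hh | hh
            · rw [← hh]; exact foldl_min_le_init _ _
            · exact foldl_min_le_mem _ _ _ hh
          · apply hMle
            rcases foldl_min_mem DT (pvDiff lst 0) with hh | hh
            · rw [hh]; exact hd0mem
            · exact hDTsub _ hh
        have hMne : M ≠ 0 := by
          have h := hbk DT.length le_rfl
          rw [List.take_length, hM'] at h
          exact h
        rw [if_pos hMne, hfold1, step1_fold_ne DT (pvDiff lst 0) 1 hbk, hM']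
        rw [if_neg hMne]
        rw [PySem.List.count_eq, hcons, List.count_cons]
        by_cases hMd : M = pvDiff lst 0
        · rw [if_pos hMd]
          simp [hMd]
          push_cast
          ring
        · have hMd2 : ¬ pvDiff lst 0 = M := fun hc => hMd hc.symm
          rw [if_neg hMd]
          simp [hMd, hMd2]
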